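-- pv_equiv track=rewrite | github.com/paul-e-king/Python-Files-and-Projects | 4U/code_for_test_questions_.py | shiftIt
-- ===== SOURCE A (Python) =====
-- def shiftIt(v):
--     v2 = []
--     if isinstance(v, list):
--         v2 = [0] * len(v)
--         for i in range(len(v)):
--             j = (i + 2) % len(v)
--             v2[j] = v[i]
--     return v2
-- ===== SOURCE B (Python) =====
-- def shiftIt(v):
--     if isinstance(v, list):
--         return v[-2:] + v[:-2]
--     return []
-- ===== Notes on version B (the rewrite author's own statement) =====
-- stated objective: idiomatic
-- what changed: Replaces the zero-filled buffer and the per-element scatter loop with modular index arithmetic by a single slice concatenation v[-2:] + v[:-2] computing the 2-position rotation.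
import Mathlib
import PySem

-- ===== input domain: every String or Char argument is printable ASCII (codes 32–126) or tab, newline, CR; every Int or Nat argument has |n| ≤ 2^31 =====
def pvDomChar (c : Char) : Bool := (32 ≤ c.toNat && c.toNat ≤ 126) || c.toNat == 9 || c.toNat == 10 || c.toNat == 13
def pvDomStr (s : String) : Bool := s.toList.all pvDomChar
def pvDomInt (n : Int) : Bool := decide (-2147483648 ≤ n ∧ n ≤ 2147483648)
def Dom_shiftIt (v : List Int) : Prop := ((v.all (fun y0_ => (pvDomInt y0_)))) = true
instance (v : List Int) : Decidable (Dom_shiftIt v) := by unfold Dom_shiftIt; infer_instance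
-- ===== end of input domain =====

-- B replaces A's scatter loop over a zero-filled buffer by a single slice concatenation
-- v[-2:] + v[:-2] (idiomatic rotation); same return value on every list.

-- ===== PORT A =====
-- Python A: the isinstance(v, list) guard is always true under the List Int type, so the
-- guarded body is the whole function.  i, len(v) ≥ 0, so Python's % agrees with Nat.mod.
def shiftIt (v : List Int) : List Int :=
  let n := v.length
  (List.range n).foldl (fun v2 i => v2.set ((i + 2) % n) (v.getD i 0)) (List.replicate n 0)

-- ===== PORT B =====
-- Python B: v[-2:] + v[:-2] (isinstance guard likewise always true).
def shiftIt_alt (v : List Int) : List Int :=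
  PySem.List.slice v (some (-2)) none ++ PySem.List.slice v none (some (-2))

-- ===== PRECONDITION & SPEC =====
def Spec_shiftIt (v : List Int) (out : List Int) : Prop := out = shiftIt_alt v
instance (v : List Int) (out : List Int) : Decidable (Spec_shiftIt v out) := by unfold Spec_shiftIt; infer_instance

-- ===== CLAIM (what is proved, stated in full; the proofs are below) =====
def Claim_equal_shiftIt : Prop := ∀ (v : List Int), Dom_shiftIt v → Spec_shiftIt v (shiftIt v)

-- ===== LEMMAS AND PROOFS =====

-- the scatter loop preserves the buffer's length
lemma scatter_length (v : List Int) (n : Nat) (m : Nat) (l : List Int) :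
    ((List.range m).foldl (fun v2 i => v2.set ((i + 2) % n) (v.getD i 0)) l).length = l.length := by
  induction m generalizing l with
  | zero => simp
  | succ m ih =>
      rw [List.range_succ, List.foldl_append]
      simp only [List.foldl_cons, List.foldl_nil, List.length_set]
      exact ih l

-- index arithmetic: (j + n - 2) % n = m ↔ j = (m + 2) % n, for j m < n
lemma mod_shift (n j m : Nat) (hj : j < n) (hm : m < n) :
    (j + n - 2) % n = m ↔ j = (m + 2) % n := by
  match n with
  | 0 => omega
  | 1 =>
      have : j = 0 := by omega
      have : m = 0 := by omega
      subst_vars; simp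
  | (k + 2) =>
      have h1 : (j + (k + 2) - 2) % (k + 2) = if j < 2 then j + k else j - 2 := by
        split
        · rw [Nat.mod_eq_of_lt (by omega)]; omega
        · rw [Nat.mod_eq_sub_mod (by omega), Nat.mod_eq_of_lt (by omega)]; omega
      have h2 : (m + 2) % (k + 2) = if m + 2 < k + 2 then m + 2 else m - k := by
        split
        · rw [Nat.mod_eq_of_lt (by omega)]
        · rw [Nat.mod_eq_sub_mod (by omega), Nat.mod_eq_of_lt (by omega)]; omega
      rw [h1, h2]
      split_ifs <;> omega

-- after m loop iterations, position j holds v[(j+n-2) % n] if that source index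
-- has already been processed (< m) and still holds the initial 0 otherwise
lemma scatter_get (v : List Int) (n : Nat) (hn : n = v.length)
    (m : Nat) (hm : m ≤ n) (j : Nat) (hj : j < n) :
    ((List.range m).foldl (fun v2 i => v2.set ((i + 2) % n) (v.getD i 0))
        (List.replicate n 0)).getD j 0
      = if (j + n - 2) % n < m then v.getD ((j + n - 2) % n) 0 else 0 := by
  induction m with
  | zero => simp
  | succ m ih =>
      rw [List.range_succ, List.foldl_append]
      simp only [List.foldl_cons, List.foldl_nil]
      have hlen : ((List.range m).foldl (fun v2 i => v2.set ((i + 2) % n) (v.getD i 0))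
          (List.replicate n 0)).length = n := by
        rw [scatter_length]; simp
      have hmlt : m < n := by omega
      by_cases hje : j = (m + 2) % n
      · have hsrc : (j + n - 2) % n = m := (mod_shift n j m hj hmlt).2 hje
        have hlt : (m + 2) % n < ((List.range m).foldl
            (fun v2 i => v2.set ((i + 2) % n) (v.getD i 0)) (List.replicate n 0)).length := by
          rw [hlen]; exact Nat.mod_lt _ (by omega)
        rw [List.getD_eq_getElem?_getD, List.getElem?_set, if_pos hje.symm, if_pos hlt]
        simp [hsrc]
      · have hsrc : (j + n - 2) % n ≠ m := fun h => hje ((mod_shift n j m hj hmlt).1 h)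
        rw [List.getD_eq_getElem?_getD, List.getElem?_set,
          if_neg (fun h => hje h.symm), ← List.getD_eq_getElem?_getD,
          ih (by omega)]
        have hiff : (j + n - 2) % n < m + 1 ↔ (j + n - 2) % n < m := by omega
        simp only [hiff]

-- the rotation's element at j is the same source element
lemma rot_get (v : List Int) (j : Nat) (hj : j < v.length) :
    (v.drop (v.length - 2) ++ v.take (v.length - 2)).getD j 0
      = v.getD ((j + v.length - 2) % v.length) 0 := by
  by_cases h2 : v.length < 2
  · have h1 : v.length = 1 := by omega
    obtain ⟨a, rfl⟩ := List.length_eq_one_iff.mp h1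
    have hj0 : j = 0 := by omega
    subst hj0; rfl
  · have h1 : (j + v.length - 2) % v.length = if j < 2 then j + v.length - 2 else j - 2 := by
      split
      · rw [Nat.mod_eq_of_lt (by omega)]
      · rw [Nat.mod_eq_sub_mod (by omega), Nat.mod_eq_of_lt (by omega)]; omega
    rw [h1]
    have hdl : (v.drop (v.length - 2)).length = 2 := by
      rw [List.length_drop]; omega
    by_cases hj2 : j < 2
    · rw [if_pos hj2, List.getD_eq_getElem?_getD, List.getElem?_append_left (by rw [hdl]; omega),
        List.getElem?_drop, List.getD_eq_getElem?_getD]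
      have hix : v.length - 2 + j = j + v.length - 2 := by omega
      rw [hix]
    · rw [if_neg hj2, List.getD_eq_getElem?_getD, List.getElem?_append_right (by rw [hdl]; omega),
        List.getElem?_take, List.getD_eq_getElem?_getD, hdl, if_pos (by omega)]

-- ===== VERDICT (by name: the statement is the Claim_ definition above) =====
theorem shiftIt_spec : Claim_equal_shiftIt := by
  intro v _
  show shiftIt v = shiftIt_alt v
  unfold shiftIt shiftIt_alt
  rw [PySem.List.slice_from_neg_ofNat v 2 (by omega),
    PySem.List.slice_to_neg_ofNat v 2 (by omega)]
  set n := v.length with hn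
  have hlenL : ((List.range n).foldl (fun v2 i => v2.set ((i + 2) % n) (v.getD i 0))
      (List.replicate n 0)).length = n := by rw [scatter_length]; simp
  have hlenR : (v.drop (n - 2) ++ v.take (n - 2)).length = n := by
    simp; omega
  apply List.ext_getElem (by rw [hlenL, hlenR])
  intro j hL hR
  have hjn : j < n := by omega
  have hpos : 0 < n := by omega
  rw [← List.getD_eq_getElem _ 0, ← List.getD_eq_getElem _ 0,
    scatter_get v n hn n le_rfl j hjn, rot_get v j (by omega),
    if_pos (Nat.mod_lt _ hpos)]
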